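-- pv_equiv track=rewrite | github.com/Bingurrr/BaekJoon_algo | 프로그래머스/unrated/138476. 귤 고르기/귤 고르기.py | solution
-- ===== SOURCE A (Python) =====
-- def solution(k, tangerine):
--     answer = 0
--     dict = {}
--     for i in tangerine :
--         if i in dict :
--             dict[i] += 1
--         else :
--             dict[i] = 1
--
--     num = []
--
--     for i in dict :
--         num.append(dict[i])
--
--     num.sort(key = lambda x :x, reverse = True)
--
--     for i in num :
--         answer += 1
--         k -= i
--         if k <= 0 : break
--
--     return answer
-- ===== SOURCE B (Python) =====
-- def solution(k, tangerine):
--     freq = {}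
--     for t in tangerine:
--         freq[t] = freq.get(t, 0) + 1
--     if not freq:
--         return 0
--     buckets = {}
--     for f in freq.values():
--         buckets[f] = buckets.get(f, 0) + 1
--     answer = 0
--     for f in range(max(freq.values()), 0, -1):
--         for _ in range(buckets.get(f, 0)):
--             answer += 1
--             k -= f
--             if k <= 0:
--                 return answer
--     return answer
-- ===== Notes on version B (the rewrite author's own statement) =====
-- stated objective: alternative
-- what changed: Replaces sorting the per-kind counts in descending order with a counting-sort style histogram (a dict of count -> number of kinds) walked from the maximal count downwards, taking kinds bucket by bucket.
import Mathlib
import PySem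

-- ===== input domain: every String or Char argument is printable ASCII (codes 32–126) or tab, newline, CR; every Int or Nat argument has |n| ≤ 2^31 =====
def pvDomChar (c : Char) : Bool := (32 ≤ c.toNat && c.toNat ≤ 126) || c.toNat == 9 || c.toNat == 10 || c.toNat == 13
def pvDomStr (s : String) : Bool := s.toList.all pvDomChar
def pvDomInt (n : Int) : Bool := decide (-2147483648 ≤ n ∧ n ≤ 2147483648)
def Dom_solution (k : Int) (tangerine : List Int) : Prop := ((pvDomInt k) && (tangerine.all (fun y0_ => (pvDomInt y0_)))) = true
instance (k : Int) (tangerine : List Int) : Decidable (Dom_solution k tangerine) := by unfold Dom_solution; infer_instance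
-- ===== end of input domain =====

-- B replaces A's descending sort of the per-kind counts with a count->kinds histogram
-- walked from the maximal count down (counting-sort style); same return value everywhere.

-- ===== PORT A =====
-- the final 'for i in num: answer += 1; k -= i; if k <= 0: break' loop
def pvLoopA : List Int → Int → Int → Int
  | [], answer, _ => answer
  | i :: rest, answer, k =>
      let answer := answer + 1
      let k := k - i
      if k ≤ 0 then answer else pvLoopA rest answer k

def solution (k : Int) (tangerine : List Int) : Int :=
  let d := tangerine.foldl (fun d i =>
    match d.get? i with                      -- 'if i in dict'
    | some v => d.insert i (v + 1)           -- 'dict[i] += 1'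
    | none => d.insert i 1)                  -- 'dict[i] = 1'
    (PySem.Dict.empty : PySem.Dict Int Int)
  -- 'for i in dict: num.append(dict[i])'  (every key is present, so dict[i] = getD i 0)
  let num := d.keys.foldl (fun num i => num ++ [d.getD i 0]) ([] : List Int)
  let num := PySem.List.sorted num (fun x => x) true   -- num.sort(key=lambda x: x, reverse=True)
  pvLoopA num 0 k

-- ===== PORT B =====
-- inner 'for _ in range(buckets.get(f, 0))' with the early 'return answer'
def pvAltInner (f : Int) : Nat → Int → Int → Sum Int (Int × Int)
  | 0, answer, k => .inr (answer, k)
  | c + 1, answer, k =>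
      let answer := answer + 1
      let k := k - f
      if k ≤ 0 then .inl answer else pvAltInner f c answer k

def pvAltOuter (buckets : PySem.Dict Int Int) : List Int → Int → Int → Int
  | [], answer, _ => answer
  | f :: fs, answer, k =>
      match pvAltInner f (buckets.getD f 0).toNat answer k with
      | .inl answer => answer
      | .inr (answer, k) => pvAltOuter buckets fs answer k

def solution_alt (k : Int) (tangerine : List Int) : Int :=
  let freq := tangerine.foldl (fun d t => d.insert t (d.getD t 0 + 1))
    (PySem.Dict.empty : PySem.Dict Int Int)
  if freq.items = [] then 0                  -- 'if not freq: return 0'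
  else
    let buckets := freq.values.foldl (fun d f => d.insert f (d.getD f 0 + 1))
      (PySem.Dict.empty : PySem.Dict Int Int)
    match PySem.List.max? freq.values (fun x => x) with
    | none => 0                              -- unreachable: freq is nonempty here
    | some m => pvAltOuter buckets (PySem.List.pyRange m 0 (-1)) 0 k

-- ===== PRECONDITION & SPEC =====
def Spec_solution (k : Int) (tangerine : List Int) (out : Int) : Prop := out = solution_alt k tangerine
instance (k : Int) (tangerine : List Int) (out : Int) : Decidable (Spec_solution k tangerine out) := by unfold Spec_solution; infer_instance

-- ===== CLAIM (what is proved, stated in full; the proofs are below) =====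
def Claim_equal_solution : Prop := ∀ (k : Int) (tangerine : List Int), Dom_solution k tangerine → Spec_solution k tangerine (solution k tangerine)

-- ===== LEMMAS AND PROOFS =====

-- the list of per-kind counts, shared shape of both programs
def pvVals (tangerine : List Int) : List Int := (PySem.Dict.counter tangerine).values

-- the descending concatenation of constant blocks B effectively walks
def pvFlat (vals : List Int) (a : Int) : List Int :=
  (PySem.List.pyRange a 0 (-1)).flatMap (fun f => List.replicate (vals.count f) f)

lemma pvFlat_mem (vals : List Int) (a x : Int) (hx : x ∈ pvFlat vals a) : 0 < x ∧ x ≤ a := by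
  simp only [pvFlat, List.mem_flatMap] at hx
  obtain ⟨f, hf, hx⟩ := hx
  rw [PySem.List.mem_pyRange_neg_one] at hf
  have := List.eq_of_mem_replicate hx
  omega

lemma pvFlat_count (vals : List Int) : ∀ (n : Nat) (a : Int), a ≤ n → ∀ x,
    (pvFlat vals a).count x = if 0 < x ∧ x ≤ a then vals.count x else 0 := by
  intro n
  induction n with
  | zero =>
      intro a ha x
      rw [show pvFlat vals a = [] from by
        simp [pvFlat, PySem.List.pyRange_neg_one_eq_nil (by omega : a ≤ 0)]]
      simp only [List.count_nil]
      split_ifs with h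
      · omega
      · rfl
  | succ n ih =>
      intro a ha x
      by_cases h0 : a ≤ 0
      · rw [show pvFlat vals a = [] from by
          simp [pvFlat, PySem.List.pyRange_neg_one_eq_nil h0]]
        simp only [List.count_nil]
        split_ifs with h
        · omega
        · rfl
      · have hcons : pvFlat vals a = List.replicate (vals.count a) a ++ pvFlat vals (a - 1) := by
          simp [pvFlat, PySem.List.pyRange_neg_one_cons (by omega : (0:Int) < a)]
        rw [hcons, List.count_append, List.count_replicate, ih (a - 1) (by omega) x]
        by_cases hxa : x = a
        · subst hxa
          simp only [beq_self_eq_true, if_pos]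
          rw [if_neg (by omega), if_pos (by omega)]
          omega
        · rw [if_neg (by simp only [beq_iff_eq]; omega)]
          split_ifs <;> omega

lemma pvFlat_pairwise (vals : List Int) : ∀ (n : Nat) (a : Int), a ≤ n →
    (pvFlat vals a).Pairwise (· ≥ ·) := by
  intro n
  induction n with
  | zero =>
      intro a ha
      rw [show pvFlat vals a = [] from by
        simp [pvFlat, PySem.List.pyRange_neg_one_eq_nil (by omega : a ≤ 0)]]
      exact List.Pairwise.nil
  | succ n ih =>
      intro a ha
      by_cases h0 : a ≤ 0
      · rw [show pvFlat vals a = [] from by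
          simp [pvFlat, PySem.List.pyRange_neg_one_eq_nil h0]]
        exact List.Pairwise.nil
      · have hcons : pvFlat vals a = List.replicate (vals.count a) a ++ pvFlat vals (a - 1) := by
          simp [pvFlat, PySem.List.pyRange_neg_one_cons (by omega : (0:Int) < a)]
        rw [hcons, List.pairwise_append]
        refine ⟨List.pairwise_replicate.mpr (Or.inr le_rfl), ih (a - 1) (by omega), ?_⟩
        intro x hx y hy
        have hxa := List.eq_of_mem_replicate hx
        have := pvFlat_mem vals (a - 1) y hy
        omega

lemma pvVals_pos (tangerine : List Int) : ∀ y ∈ pvVals tangerine, 1 ≤ y := by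
  intro y hy
  simp only [pvVals, PySem.Dict.values, PySem.Dict.items_counter, List.map_map,
    List.mem_map, Function.comp] at hy
  obtain ⟨kk, hk, rfl⟩ := hy
  have : kk ∈ tangerine := (PySem.Set.mem_ofList tangerine kk).mp hk
  have := List.count_pos_iff.mpr this
  omega

lemma pvA_eq (k : Int) (tangerine : List Int) :
    solution k tangerine = pvLoopA (PySem.List.sorted (pvVals tangerine) (fun x => x) true) 0 k := by
  have hfun : (fun (d : PySem.Dict Int Int) i =>
      match d.get? i with
      | some v => d.insert i (v + 1)
      | none => d.insert i 1) = fun d i => d.insert i (d.getD i 0 + 1) := by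
    funext d i
    cases h : d.get? i with
    | some v => simp [h, PySem.Dict.getD]
    | none => simp [h, PySem.Dict.getD]
  simp only [solution, hfun, PySem.Dict.foldl_insert_getD_add_one_eq_counter,
    PySem.List.foldl_append_singleton_eq_map]
  rw [← PySem.Dict.values_eq_map_keys _ (PySem.Dict.nodup_keys_counter tangerine) 0]
  rfl

lemma pvB_eq (k : Int) (tangerine : List Int) (hne : tangerine ≠ []) :
    ∃ m, PySem.List.max? (pvVals tangerine) (fun x => x) = some m ∧
      solution_alt k tangerine =
        pvAltOuter ((pvVals tangerine).foldl (fun d f => d.insert f (d.getD f 0 + 1))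
          (PySem.Dict.empty : PySem.Dict Int Int)) (PySem.List.pyRange m 0 (-1)) 0 k := by
  have hvals : (PySem.Dict.counter tangerine).values ≠ [] := by
    obtain ⟨x, hx⟩ := List.exists_mem_of_ne_nil tangerine hne
    intro h
    have : x ∈ (PySem.Dict.counter tangerine).keys := by
      simp [PySem.Dict.keys_counter, PySem.Set.mem_ofList, hx]
    simp only [PySem.Dict.keys, PySem.Dict.values] at this h
    rw [List.map_eq_nil_iff] at h
    simp [h] at this
  obtain ⟨m, hm⟩ : ∃ m, PySem.List.max? (PySem.Dict.counter tangerine).values (fun x => x) = some m := by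
    cases h : PySem.List.max? (PySem.Dict.counter tangerine).values (fun x => x) with
    | none => exact absurd ((PySem.List.max?_eq_none_iff _ _).mp h) hvals
    | some m => exact ⟨m, rfl⟩
  refine ⟨m, hm, ?_⟩
  have hitems : (PySem.Dict.counter tangerine).items ≠ [] := by
    intro h
    apply hvals
    simp only [PySem.Dict.values, h, List.map_nil]
  simp only [solution_alt, PySem.Dict.foldl_insert_getD_add_one_eq_counter, hitems, if_false, hm]
  rfl

lemma pvSorted_eq_flat (tangerine : List Int) (m : Int)
    (hm : PySem.List.max? (pvVals tangerine) (fun x => x) = some m) :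
    PySem.List.sorted (pvVals tangerine) (fun x => x) true = pvFlat (pvVals tangerine) m := by
  have hperm : (pvFlat (pvVals tangerine) m).Perm (pvVals tangerine) := by
    rw [List.perm_iff_count]
    intro x
    rw [pvFlat_count _ (m.toNat) m (by omega) x]
    split_ifs with h
    · rfl
    · symm
      rw [List.count_eq_zero]
      intro hx
      have h1 := pvVals_pos tangerine x hx
      have h2 := PySem.List.max?_isMax hm x hx
      simp only at h2
      omega
  refine List.Perm.eq_of_pairwise (le := fun (a b : Int) => b ≤ a)
    (fun a b _ _ h1 h2 => by omega) ?_ ?_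
    ((PySem.List.sorted_perm _ _ _).trans hperm.symm)
  · exact (PySem.List.sorted_pairwise_rev (pvVals tangerine) (fun x => x)).imp (fun h => h)
  · exact (pvFlat_pairwise _ (m.toNat) m (by omega)).imp (fun h => h)

lemma pvBlock (f : Int) (c : Nat) :
    ∀ (rest : List Int) (answer k : Int),
      pvLoopA (List.replicate c f ++ rest) answer k =
        (match pvAltInner f c answer k with
         | .inl a => a
         | .inr (a, k') => pvLoopA rest a k') := by
  induction c with
  | zero => intro rest answer k; rfl
  | succ c ih =>
      intro rest answer k
      simp only [List.replicate_succ, List.cons_append, pvLoopA, pvAltInner]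
      by_cases h : k - f ≤ 0
      · simp [h]
      · simp [h, ih]

lemma pvMain (vals : List Int) (buckets : PySem.Dict Int Int)
    (hb : ∀ f, buckets.getD f 0 = (vals.count f : Int)) (a : Int) :
    ∀ (answer k : Int),
      pvLoopA (pvFlat vals a) answer k = pvAltOuter buckets (PySem.List.pyRange a 0 (-1)) answer k := by
  have aux : ∀ (n : Nat) (a : Int), a ≤ n → ∀ (answer k : Int),
      pvLoopA (pvFlat vals a) answer k = pvAltOuter buckets (PySem.List.pyRange a 0 (-1)) answer k := by
    intro n
    induction n with
    | zero =>
        intro a ha answer k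
        rw [PySem.List.pyRange_neg_one_eq_nil (by omega : a ≤ 0),
          show pvFlat vals a = [] from by
            simp [pvFlat, PySem.List.pyRange_neg_one_eq_nil (by omega : a ≤ 0)]]
        rfl
    | succ n ih =>
        intro a ha answer k
        by_cases h0 : a ≤ 0
        · rw [PySem.List.pyRange_neg_one_eq_nil h0,
            show pvFlat vals a = [] from by
              simp [pvFlat, PySem.List.pyRange_neg_one_eq_nil h0]]
          rfl
        · rw [PySem.List.pyRange_neg_one_cons (by omega : (0:Int) < a),
            show pvFlat vals a = List.replicate (vals.count a) a ++ pvFlat vals (a - 1) from by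
              simp [pvFlat, PySem.List.pyRange_neg_one_cons (by omega : (0:Int) < a)]]
          rw [pvBlock a (vals.count a)]
          simp only [pvAltOuter, hb a, Int.toNat_natCast]
          cases pvAltInner a (vals.count a) answer k with
          | inl a' => rfl
          | inr p => exact ih (a - 1) (by omega) p.1 p.2
  intro answer k
  exact aux (a.toNat) a (by omega) answer k

-- ===== VERDICT (by name: the statement is the Claim_ definition above) =====
theorem solution_spec : Claim_equal_solution := by
  intro k tangerine _
  unfold Spec_solution
  by_cases hne : tangerine = []
  · subst hne; rfl
  · obtain ⟨m, hm, hB⟩ := pvB_eq k tangerine hne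
    rw [pvA_eq, hB, pvSorted_eq_flat tangerine m hm]
    exact pvMain _ _ (fun f => by
      rw [PySem.Dict.getD_foldl_insert_add_one]
      simp [PySem.Dict.getD, PySem.Dict.empty, PySem.Dict.get?]) m 0 k
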